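-- pv_equiv track=rewrite | github.com/lilbouv/AoC2024 | day7/day7.py | generate_equations
-- ===== SOURCE A (Python) =====
-- from itertools import product
--
-- def generate_equations(numbers):
--     if len(numbers) < 2:
--         raise ValueError("The list of integers must contain at least two numbers.")
--
--     # Get all combinations of operators for the number of gaps between numbers
--     operators = ['+', '*', "||"]
--     operator_combinations = product(operators, repeat=len(numbers) - 1)
--
--     # Generate equations by interleaving numbers with operator combinations
--     equations = []
--     for ops in operator_combinations:
--         equation = str(numbers[0])
--         for num, op in zip(numbers[1:], ops):
--             equation += f" {op} {num}"
--         equations.append(equation)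
--
--     return equations
-- ===== SOURCE B (Python) =====
-- def generate_equations(numbers):
--     if len(numbers) < 2:
--         raise ValueError("The list of integers must contain at least two numbers.")
--     parts = [str(numbers[0])]
--     for num in numbers[1:]:
--         parts = [p + f" {op} {num}" for p in parts for op in ['+', '*', '||']]
--     return parts
-- ===== Notes on version B (the rewrite author's own statement) =====
-- stated objective: simpler
-- what changed: Replaces itertools.product over operator tuples plus an inner zip loop with incremental expansion: a list of partial equations is extended number by number, each step crossing the partials with the three operators.
import Mathlib
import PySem

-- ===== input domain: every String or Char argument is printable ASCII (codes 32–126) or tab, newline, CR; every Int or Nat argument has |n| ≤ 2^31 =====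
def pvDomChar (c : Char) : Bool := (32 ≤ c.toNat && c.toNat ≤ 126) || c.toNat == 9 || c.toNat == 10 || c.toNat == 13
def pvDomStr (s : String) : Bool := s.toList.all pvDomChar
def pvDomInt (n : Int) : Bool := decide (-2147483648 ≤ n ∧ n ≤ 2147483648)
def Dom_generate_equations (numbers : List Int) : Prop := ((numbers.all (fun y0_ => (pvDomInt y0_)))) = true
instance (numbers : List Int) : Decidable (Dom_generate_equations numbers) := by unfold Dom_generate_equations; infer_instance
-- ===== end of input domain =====

-- B replaces itertools.product + inner zip loop by incremental expansion of partial
-- equations (simpler decomposition); same return value on all lists of length ≥ 2.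

-- ===== PORT A =====
-- itertools.product(operators, repeat=n), leftmost position varies slowest
def prodRep (ops : List String) : Nat → List (List String)
  | 0 => [[]]
  | n + 1 => ops.flatMap (fun o => (prodRep ops n).map (fun os => o :: os))

def generate_equations (numbers : List Int) : List String :=
  match numbers with
  | [] => []            -- len(numbers) < 2: ValueError, excluded by Pre_
  | n0 :: rest =>
    if rest = [] then [] -- ValueError, excluded by Pre_
    else
      (prodRep ["+", "*", "||"] rest.length).map (fun os =>
        (rest.zip os).foldl
          (fun eq p => eq ++ " " ++ p.2 ++ " " ++ PySem.Int.toStr p.1)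
          (PySem.Int.toStr n0))

-- ===== PORT B =====
def generate_equations_alt (numbers : List Int) : List String :=
  match numbers with
  | [] => []            -- ValueError, excluded by Pre_
  | n0 :: rest =>
    if rest = [] then [] -- ValueError, excluded by Pre_
    else
      rest.foldl
        (fun parts num => parts.flatMap (fun p =>
          ["+", "*", "||"].map (fun op => p ++ " " ++ op ++ " " ++ PySem.Int.toStr num)))
        [PySem.Int.toStr n0]

-- ===== PRECONDITION & SPEC =====
-- A raises ValueError on lists with fewer than two numbers (B raises the same).
def Pre_generate_equations (numbers : List Int) : Prop := 2 ≤ numbers.length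
instance (numbers : List Int) : Decidable (Pre_generate_equations numbers) := by unfold Pre_generate_equations; infer_instance
def pvWitness_generate_equations : List Int := [1, -2, 3]

def Spec_generate_equations (numbers : List Int) (out : List String) : Prop := out = generate_equations_alt numbers
instance (numbers : List Int) (out : List String) : Decidable (Spec_generate_equations numbers out) := by unfold Spec_generate_equations; infer_instance

-- ===== CLAIM (what is proved, stated in full; the proofs are below) =====
def Claim_equal_generate_equations : Prop := ∀ (numbers : List Int), Dom_generate_equations numbers → Pre_generate_equations numbers → Spec_generate_equations numbers (generate_equations numbers)

-- ===== LEMMAS AND PROOFS =====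

-- the key invariant: B's fold over the remaining numbers expands every current
-- partial by every operator tuple, in A's (product) order
theorem foldl_expand (rest : List Int) (parts : List String) :
    rest.foldl
        (fun parts num => parts.flatMap (fun p =>
          ["+", "*", "||"].map (fun op => p ++ " " ++ op ++ " " ++ PySem.Int.toStr num)))
        parts
    = parts.flatMap (fun p =>
        (prodRep ["+", "*", "||"] rest.length).map (fun os =>
          (rest.zip os).foldl
            (fun eq q => eq ++ " " ++ q.2 ++ " " ++ PySem.Int.toStr q.1) p)) := by
  induction rest generalizing parts with
  | nil => simp [prodRep]
  | cons num rest ih =>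
    simp only [List.foldl_cons, ih, prodRep, List.length_cons]
    simp [List.flatMap_assoc, Function.comp_def]

-- ===== VERDICT (by name: the statement is the Claim_ definition above) =====
theorem generate_equations_spec : Claim_equal_generate_equations := by
  intro numbers _ hpre
  unfold Spec_generate_equations generate_equations generate_equations_alt
  match numbers with
  | [] => simp [Pre_generate_equations] at hpre
  | n0 :: rest =>
    have hne : rest ≠ [] := by
      intro h; subst h; simp [Pre_generate_equations] at hpre
    simp only [if_neg hne, foldl_expand, List.flatMap_cons, List.flatMap_nil,
      List.append_nil]
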